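-- pv_equiv track=rewrite | github.com/rand/cc-experiments | skills/rust/pyo3-type-conversion-advanced/resources/scripts/buffer_inspector.py | _compute_expected_strides
-- ===== SOURCE A (Python) =====
-- from typing import Any, Dict, List, Optional, Tuple, Union
--
-- def _compute_expected_strides(
--     shape: Optional[Tuple[int, ...]],
--     itemsize: int,
--     c_order: bool = True
-- ) -> Optional[Tuple[int, ...]]:
--     """Compute expected strides for contiguous array."""
--     if not shape:
--         return None
--
--     if c_order:
--         # C order: last dimension varies fastest
--         strides = []
--         stride = itemsize
--         for dim in reversed(shape):
--             strides.insert(0, stride)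
--             stride *= dim
--         return tuple(strides)
--     else:
--         # Fortran order: first dimension varies fastest
--         strides = []
--         stride = itemsize
--         for dim in shape:
--             strides.append(stride)
--             stride *= dim
--         return tuple(strides)
-- ===== SOURCE B (Python) =====
-- def _compute_expected_strides(shape, itemsize, c_order=True):
--     """Compute expected strides for contiguous array (per-index slice products)."""
--     if not shape:
--         return None
--
--     def prod(xs):
--         p = 1
--         for x in xs:
--             p *= x
--         return p
--
--     n = len(shape)
--     if c_order:
--         return tuple(itemsize * prod(shape[i + 1:]) for i in range(n))
--     else:
--         return tuple(itemsize * prod(shape[:i]) for i in range(n))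
-- ===== Notes on version B (the rewrite author's own statement) =====
-- stated objective: alternative
-- what changed: Replaces the running-product accumulation loops (with insert(0)/append) by a per-index formulation: each stride is computed independently as itemsize times the product of a slice of the shape.
import Mathlib
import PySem

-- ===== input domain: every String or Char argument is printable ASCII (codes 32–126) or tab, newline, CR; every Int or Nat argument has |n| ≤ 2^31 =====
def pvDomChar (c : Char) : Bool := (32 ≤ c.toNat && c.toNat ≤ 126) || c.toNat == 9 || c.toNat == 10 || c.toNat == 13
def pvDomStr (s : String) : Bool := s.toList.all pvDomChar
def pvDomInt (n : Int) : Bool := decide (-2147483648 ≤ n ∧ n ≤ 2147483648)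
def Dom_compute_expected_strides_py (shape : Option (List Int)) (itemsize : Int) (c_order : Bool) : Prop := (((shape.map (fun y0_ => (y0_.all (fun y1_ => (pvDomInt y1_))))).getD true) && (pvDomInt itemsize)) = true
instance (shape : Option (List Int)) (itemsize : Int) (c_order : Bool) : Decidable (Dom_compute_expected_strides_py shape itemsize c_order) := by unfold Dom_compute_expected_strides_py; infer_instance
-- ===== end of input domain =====

-- B replaces A's running-product accumulation loops by computing each stride independently as itemsize times the product of a shape slice (alternative decomposition, not faster).
-- ===== PORT A =====
-- A's C-order loop: for dim in reversed(shape): strides.insert(0, stride); stride *= dim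
def aLoopC : List Int → List Int → Int → List Int
  | [], strides, _ => strides
  | d :: rest, strides, stride => aLoopC rest (stride :: strides) (stride * d)

-- A's Fortran-order loop: for dim in shape: strides.append(stride); stride *= dim
def aLoopF : List Int → List Int → Int → List Int
  | [], strides, _ => strides
  | d :: rest, strides, stride => aLoopF rest (strides ++ [stride]) (stride * d)

def compute_expected_strides_py (shape : Option (List Int)) (itemsize : Int) (c_order : Bool) : Option (List Int) :=
  match shape with
  | none => none
  | some l =>
    if l = [] then none
    else if c_order then some (aLoopC l.reverse [] itemsize)
    else some (aLoopF l [] itemsize)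

-- ===== PORT B =====
-- B's prod helper: p = 1; for x in xs: p *= x
def prodB (xs : List Int) : Int := xs.foldl (· * ·) 1

def compute_expected_strides_py_alt (shape : Option (List Int)) (itemsize : Int) (c_order : Bool) : Option (List Int) :=
  match shape with
  | none => none
  | some l =>
    if l = [] then none
    else if c_order then
      some ((List.range l.length).map (fun i => itemsize * prodB (l.drop (i + 1))))
    else
      some ((List.range l.length).map (fun i => itemsize * prodB (l.take i)))

-- ===== PRECONDITION & SPEC =====
def Spec_compute_expected_strides_py (shape : Option (List Int)) (itemsize : Int) (c_order : Bool) (out : Option (List Int)) : Prop := out = compute_expected_strides_py_alt shape itemsize c_order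
instance (shape : Option (List Int)) (itemsize : Int) (c_order : Bool) (out : Option (List Int)) : Decidable (Spec_compute_expected_strides_py shape itemsize c_order out) := by unfold Spec_compute_expected_strides_py; infer_instance

-- ===== CLAIM (what is proved, stated in full; the proofs are below) =====
def Claim_equal_compute_expected_strides_py : Prop := ∀ (shape : Option (List Int)) (itemsize : Int) (c_order : Bool), Dom_compute_expected_strides_py shape itemsize c_order → Spec_compute_expected_strides_py shape itemsize c_order (compute_expected_strides_py shape itemsize c_order)

-- ===== LEMMAS AND PROOFS =====

lemma prodB_cons (a : Int) (xs : List Int) : prodB (a :: xs) = a * prodB xs := by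
  have h : ∀ (ys : List Int) (b : Int), ys.foldl (· * ·) b = b * prodB ys := by
    intro ys
    induction ys with
    | nil => intro b; simp [prodB]
    | cons y t ih => intro b; simp [prodB, List.foldl, ih y, ih (b * y), mul_assoc]
  show (a :: xs).foldl (· * ·) 1 = a * prodB xs
  rw [List.foldl_cons, h xs (1 * a), one_mul]

lemma prodB_append_singleton (xs : List Int) (d : Int) : prodB (xs ++ [d]) = prodB xs * d := by
  simp [prodB, List.foldl_append]

lemma aLoopC_eq (l : List Int) : ∀ (acc : List Int) (s : Int),
    aLoopC l.reverse acc s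
      = ((List.range l.length).map (fun i => s * prodB (l.drop (i + 1)))) ++ acc := by
  induction l using List.reverseRecOn with
  | nil => intro acc s; simp [aLoopC]
  | append_singleton t d ih =>
    intro acc s
    rw [List.reverse_append, List.reverse_singleton, List.singleton_append]
    show aLoopC (d :: t.reverse) acc s = _
    rw [aLoopC, ih (s :: acc) (s * d)]
    rw [List.length_append, List.length_singleton, List.range_succ, List.map_append]
    have hterm : ((List.range t.length).map (fun i => (s * d) * prodB (t.drop (i + 1))))
        = ((List.range t.length).map (fun i => s * prodB ((t ++ [d]).drop (i + 1)))) := by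
      apply List.map_congr_left
      intro i hi
      rw [List.mem_range] at hi
      rw [List.drop_append_of_le_length (by omega), prodB_append_singleton]
      ring
    rw [hterm]
    simp [prodB]

lemma aLoopF_eq (l : List Int) : ∀ (acc : List Int) (s : Int),
    aLoopF l acc s
      = acc ++ ((List.range l.length).map (fun i => s * prodB (l.take i))) := by
  induction l with
  | nil => intro acc s; simp [aLoopF]
  | cons d t ih =>
    intro acc s
    rw [aLoopF, ih (acc ++ [s]) (s * d)]
    rw [List.length_cons, List.range_succ_eq_map, List.map_cons, List.map_map]
    have hterm : ((List.range t.length).map (fun i => (s * d) * prodB (t.take i)))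
        = (List.range t.length).map ((fun i => s * prodB ((d :: t).take i)) ∘ Nat.succ) := by
      apply List.map_congr_left
      intro i hi
      simp [List.take_succ_cons, prodB_cons, mul_assoc]
    rw [hterm]
    simp [prodB]

-- ===== VERDICT (by name: the statement is the Claim_ definition above) =====
theorem compute_expected_strides_py_spec : Claim_equal_compute_expected_strides_py := by
  intro shape itemsize c_order _
  unfold Spec_compute_expected_strides_py compute_expected_strides_py compute_expected_strides_py_alt
  match shape with
  | none => rfl
  | some l =>
    by_cases h : l = []
    · simp [h]
    · cases c_order with
      | true => simp [h, aLoopC_eq l [] itemsize]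
      | false => simp [h, aLoopF_eq l [] itemsize]
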